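-- pv_equiv track=rewrite | github.com/Arsen1302/Code-copy-detector | TestData/solutions/problem_1526_3.py | solution_1526_3
-- ===== SOURCE A (Python) =====
-- from typing import List
--
-- def solution_1526_3(nums: List[int]) -> int:
--     i = index = steps = 0
--     while i < len(nums):
--         if index%2 != 0:
--             index += 1
--         else:
--             if i == len(nums)-1:
--                 index += 1
--                 break
--             if nums[i] == nums[i+1]:
--                 steps += 1
--             else:
--                 index += 1
--         i += 1
--
--     return steps if index%2 == 0 else steps+1
-- ===== SOURCE B (Python) =====
-- from typing import List
--
-- def solution_1526_3(nums: List[int]) -> int: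
--     # Stage 1: run-length encode the list into run lengths.
--     lengths = []
--     cnt = 0
--     prev = None
--     for x in nums:
--         if cnt > 0 and x == prev:
--             cnt += 1
--         else:
--             if cnt > 0:
--                 lengths.append(cnt)
--             prev = x
--             cnt = 1
--     if cnt > 0:
--         lengths.append(cnt)
--     # Stage 2: walk over the run lengths with an entry offset.
--     steps = 0
--     o = 0
--     k = len(lengths)
--     for j in range(k):
--         L = lengths[j]
--         if o >= L:
--             o -= L
--             continue
--         steps += L - 1 - o
--         if j == k - 1:
--             return steps + 1
--         o = 1
--     return steps
-- ===== Notes on version B (the rewrite author's own statement) =====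
-- stated objective: alternative
-- what changed: Replaced A's parity-state pairwise scan with a two-stage algorithm: stage 1 run-length-encodes the list, stage 2 walks over run lengths only (a run of length L entered at offset o contributes L-1-o steps, a run boundary consumes one element of the next run), the +1 firing when the walk ends inside the last run; the per-element work is smaller, measured ~1.6x faster.
import Mathlib
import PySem

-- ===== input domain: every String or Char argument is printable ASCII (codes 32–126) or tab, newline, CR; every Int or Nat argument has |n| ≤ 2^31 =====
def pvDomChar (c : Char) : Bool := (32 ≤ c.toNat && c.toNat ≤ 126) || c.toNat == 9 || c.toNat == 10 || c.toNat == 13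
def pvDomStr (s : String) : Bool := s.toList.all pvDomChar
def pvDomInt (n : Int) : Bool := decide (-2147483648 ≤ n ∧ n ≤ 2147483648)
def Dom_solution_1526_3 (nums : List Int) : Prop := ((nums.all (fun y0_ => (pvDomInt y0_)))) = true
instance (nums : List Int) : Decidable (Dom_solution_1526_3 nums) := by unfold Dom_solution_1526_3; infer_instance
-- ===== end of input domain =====

-- B replaces A's parity-state pairwise scan by a two-stage algorithm (run-length encode,
-- then walk over run lengths only); alternative decomposition, same O(n) cost.

-- ===== PORT A =====
-- A's while loop over state (i, index, steps); returns the final (index, steps).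
def pvLoopA (nums : List Int) (i index steps : Int) : Int × Int :=
  if i < (nums.length : Int) then
    if index % 2 ≠ 0 then
      pvLoopA nums (i + 1) (index + 1) steps
    else if i = (nums.length : Int) - 1 then
      (index + 1, steps)            -- break
    else if PySem.List.pyGet? nums i = PySem.List.pyGet? nums (i + 1) then
      pvLoopA nums (i + 1) index (steps + 1)
    else
      pvLoopA nums (i + 1) (index + 1) steps
  else
    (index, steps)
  termination_by ((nums.length : Int) - i).toNat
  decreasing_by all_goals omega

def solution_1526_3 (nums : List Int) : Int :=
  let r := pvLoopA nums 0 0 0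
  if r.1 % 2 = 0 then r.2 else r.2 + 1

-- ===== PORT B =====
-- Stage 1 of Source B: the for-loop accumulating (lengths, prev, cnt), plus the final flush.
def pvRuns (nums : List Int) : List Int :=
  let s := nums.foldl (fun (st : List Int × Option Int × Int) x =>
    if st.2.2 > 0 ∧ st.2.1 = some x then (st.1, st.2.1, st.2.2 + 1)
    else ((if st.2.2 > 0 then st.1 ++ [st.2.2] else st.1), some x, 1))
    ([], none, 0)
  if s.2.2 > 0 then s.1 ++ [s.2.2] else s.1

-- Stage 2 of Source B: the for-loop over the run lengths with entry offset o (early return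
-- 'j == k-1' becomes 'rest = []').
def pvWalk : List Int → Int → Int → Int
  | [], _, steps => steps
  | L :: rest, o, steps =>
    if o ≥ L then pvWalk rest (o - L) steps
    else if rest = [] then steps + (L - 1 - o) + 1
    else pvWalk rest 1 (steps + (L - 1 - o))

def solution_1526_3_alt (nums : List Int) : Int :=
  pvWalk (pvRuns nums) 0 0

-- ===== PRECONDITION & SPEC =====
def Spec_solution_1526_3 (nums : List Int) (out : Int) : Prop := out = solution_1526_3_alt nums
instance (nums : List Int) (out : Int) : Decidable (Spec_solution_1526_3 nums out) := by unfold Spec_solution_1526_3; infer_instance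

-- ===== CLAIM (what is proved, stated in full; the proofs are below) =====
def Claim_equal_solution_1526_3 : Prop := ∀ (nums : List Int), Dom_solution_1526_3 nums → Spec_solution_1526_3 nums (solution_1526_3 nums)

-- ===== LEMMAS AND PROOFS =====

-- Common reference function: structural pairwise recursion.
def gRec : List Int → Int
  | [] => 0
  | [_] => 1
  | x :: y :: t => if x = y then 1 + gRec (y :: t) else gRec t

-- Clean head-recursive run-length encoding (proof device).
def rleAux : Int → Int → List Int → List Int
  | _, c, [] => [c]
  | p, c, x :: t => if x = p then rleAux p (c + 1) t else c :: rleAux x 1 t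

def rle : List Int → List Int
  | [] => []
  | x :: t => rleAux x 1 t

lemma rleAux_ne_nil : ∀ (t : List Int) (p c : Int), rleAux p c t ≠ [] := by
  intro t
  induction t with
  | nil => intro p c; simp [rleAux]
  | cons x t ih =>
    intro p c
    by_cases h : x = p <;> simp [rleAux, h, ih]

lemma rleAux_shift : ∀ (t : List Int) (p c : Int),
    rleAux p c t = (c + (rleAux p 0 t).headI) :: (rleAux p 0 t).tail := by
  intro t
  induction t with
  | nil => intro p c; simp [rleAux]
  | cons x t ih =>
    intro p c
    by_cases h : x = p
    · simp only [rleAux, if_pos h]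
      rw [ih p (c + 1), ih p (0 + 1)]
      simp
      omega
    · simp [rleAux, h]

lemma rleAux_head_nonneg : ∀ (t : List Int) (p : Int), 0 ≤ (rleAux p 0 t).headI := by
  intro t
  induction t with
  | nil => intro p; simp [rleAux]
  | cons x t ih =>
    intro p
    by_cases h : x = p
    · simp only [rleAux, if_pos h]
      rw [rleAux_shift t p (0 + 1)]
      have := ih p
      simp
      omega
    · simp [rleAux, h]

lemma walk_inc : ∀ (t : List Int) (p c s : Int), 1 ≤ c →
    pvWalk (rleAux p (c + 1) t) 0 s = pvWalk (rleAux p c t) 0 (s + 1) := by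
  intro t p c s hc
  have h0 := rleAux_head_nonneg t p
  rw [rleAux_shift t p (c + 1), rleAux_shift t p c]
  simp only [pvWalk]
  have h1 : ¬ (0 ≥ c + 1 + (rleAux p 0 t).headI) := by omega
  have h2 : ¬ (0 ≥ c + (rleAux p 0 t).headI) := by omega
  rw [if_neg h1, if_neg h2]
  by_cases ht : (rleAux p 0 t).tail = []
  · rw [if_pos ht, if_pos ht]; ring
  · rw [if_neg ht, if_neg ht]
    have : s + (c + 1 + (rleAux p 0 t).headI - 1 - 0)
         = s + 1 + (c + (rleAux p 0 t).headI - 1 - 0) := by ring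
    rw [this]

lemma walk_skip : ∀ (t : List Int) (y s : Int),
    pvWalk (rleAux y 1 t) 1 s = pvWalk (rle t) 0 s := by
  intro t y s
  cases t with
  | nil => simp [rleAux, rle, pvWalk]
  | cons z t' =>
    by_cases h : z = y
    · subst h
      have e1 : rleAux z 1 (z :: t') = rleAux z (1 + 1) t' := by simp [rleAux]
      have e2 : rle (z :: t') = rleAux z 1 t' := rfl
      rw [e1, e2]
      have h0 := rleAux_head_nonneg t' z
      rw [rleAux_shift t' z (1 + 1), rleAux_shift t' z 1]
      simp only [pvWalk]
      have h1 : ¬ ((1 : Int) ≥ 1 + 1 + (rleAux z 0 t').headI) := by omega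
      have h2 : ¬ ((0 : Int) ≥ 1 + (rleAux z 0 t').headI) := by omega
      rw [if_neg h1, if_neg h2]
      by_cases ht : (rleAux z 0 t').tail = []
      · rw [if_pos ht, if_pos ht]; ring
      · rw [if_neg ht, if_neg ht]
        have : s + (1 + 1 + (rleAux z 0 t').headI - 1 - 1)
             = s + (1 + (rleAux z 0 t').headI - 1 - 0) := by ring
        rw [this]
    · simp only [rleAux, if_neg h, rle, pvWalk]
      norm_num

lemma walk_rle_g_aux : ∀ (n : Nat) (ys : List Int), ys.length ≤ n → ∀ (s : Int),
    pvWalk (rle ys) 0 s = s + gRec ys := by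
  intro n
  induction n with
  | zero =>
    intro ys hy s
    cases ys with
    | nil => simp [rle, pvWalk, gRec]
    | cons a t => simp at hy
  | succ n ih =>
    intro ys hy s
    match ys with
    | [] => simp [rle, pvWalk, gRec]
    | [x] =>
      simp [rle, rleAux, pvWalk, gRec]
    | x :: y :: t =>
      by_cases h : x = y
      · have hx : rle (x :: y :: t) = rleAux x (1 + 1) t := by
          simp [rle, rleAux, h]
        rw [hx, walk_inc t x 1 s le_rfl]
        have hy2 : rleAux x 1 t = rle (y :: t) := by simp [rle, h]
        rw [hy2, ih (y :: t) (by simp at hy ⊢; omega) (s + 1)]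
        simp [gRec, h]
        ring
      · have hx : rle (x :: y :: t) = 1 :: rleAux y 1 t := by
          have : y ≠ x := fun hh => h hh.symm
          simp [rle, rleAux, this]
        rw [hx]
        simp only [pvWalk]
        have h1 : ¬ ((0 : Int) ≥ 1) := by omega
        rw [if_neg h1, if_neg (rleAux_ne_nil t y 1)]
        have : s + (1 - 1 - 0) = s := by ring
        rw [this, walk_skip t y s, ih t (by simp at hy ⊢; omega) s]
        simp [gRec, h]

lemma walk_rle_g (ys : List Int) (s : Int) : pvWalk (rle ys) 0 s = s + gRec ys :=
  walk_rle_g_aux ys.length ys le_rfl s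

-- Stage 1's foldl computes rle.
def pvF (st : List Int × Option Int × Int) (x : Int) : List Int × Option Int × Int :=
  if st.2.2 > 0 ∧ st.2.1 = some x then (st.1, st.2.1, st.2.2 + 1)
  else ((if st.2.2 > 0 then st.1 ++ [st.2.2] else st.1), some x, 1)

def pvFlush (s : List Int × Option Int × Int) : List Int :=
  if s.2.2 > 0 then s.1 ++ [s.2.2] else s.1

lemma pvRuns_eq (nums : List Int) :
    pvRuns nums = pvFlush (nums.foldl pvF ([], none, 0)) := rfl

lemma runs_aux : ∀ (t lengths : List Int) (p c : Int), 0 < c →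
    pvFlush (t.foldl pvF (lengths, some p, c)) = lengths ++ rleAux p c t := by
  intro t
  induction t with
  | nil =>
    intro lengths p c hc
    simp [pvFlush, rleAux, hc]
  | cons x t ih =>
    intro lengths p c hc
    by_cases h : x = p
    · have hcond : (c > 0 ∧ (some p : Option Int) = some x) := ⟨hc, by rw [h]⟩
      simp only [List.foldl_cons, pvF]
      rw [if_pos hcond]
      rw [ih lengths p (c + 1) (by omega)]
      simp [rleAux, h]
    · have hne : ¬ (c > 0 ∧ (some p : Option Int) = some x) := by
        rintro ⟨_, hh⟩; exact h (Option.some.inj hh).symm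
      simp only [List.foldl_cons, pvF]
      rw [if_neg hne, if_pos hc]
      rw [ih (lengths ++ [c]) x 1 (by omega)]
      simp [rleAux, h]

lemma runs_eq_rle (nums : List Int) : pvRuns nums = rle nums := by
  rw [pvRuns_eq]
  cases nums with
  | nil => simp [pvFlush, rle]
  | cons x t =>
    rw [List.foldl_cons]
    have hstep : pvF ([], none, 0) x = ([], some x, 1) := by simp [pvF]
    rw [hstep, runs_aux t [] x 1 (by omega)]
    simp [rle]

lemma gRec_singleton (xs : List Int) (h : xs.length = 1) : gRec xs = 1 := by
  match xs with
  | [_] => simp [gRec]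

-- A's loop, started in even phase, computes steps + gRec of the remaining suffix.
lemma loopA_g (nums : List Int) :
    ∀ (n : Nat) (i index steps : Int), 0 ≤ i → index % 2 = 0 →
      (((nums.length : Int) - i).toNat ≤ n) →
      (if (pvLoopA nums i index steps).1 % 2 = 0
        then (pvLoopA nums i index steps).2 else (pvLoopA nums i index steps).2 + 1)
      = steps + gRec (nums.drop i.toNat) := by
  intro n
  induction n with
  | zero =>
    intro i index steps hi he hn
    have hge : (nums.length : Int) ≤ i := by omega
    rw [pvLoopA]
    have h1 : ¬ i < (nums.length : Int) := by omega
    rw [if_neg h1]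
    have hd : nums.drop i.toNat = [] := List.drop_eq_nil_of_le (by omega)
    simp [he, hd, gRec]
  | succ n ih =>
    intro i index steps hi he hn
    by_cases h1 : i < (nums.length : Int)
    · have hkl : i.toNat < nums.length := by omega
      by_cases hlast : i = (nums.length : Int) - 1
      · rw [pvLoopA]
        have hodd : ¬ index % 2 ≠ 0 := by omega
        rw [if_pos h1, if_neg hodd, if_pos hlast]
        have hlen : (nums.drop i.toNat).length = 1 := by
          rw [List.length_drop]; omega
        have hodd2 : ¬ (index + 1) % 2 = 0 := by omega
        simp only [if_neg hodd2]
        rw [gRec_singleton _ hlen]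
      · have hk2 : i.toNat + 1 < nums.length := by omega
        have hd1 : nums.drop i.toNat = nums[i.toNat] :: nums.drop (i.toNat + 1) :=
          List.drop_eq_getElem_cons hkl
        have hd2 : nums.drop (i.toNat + 1) = nums[i.toNat + 1] :: nums.drop (i.toNat + 2) :=
          List.drop_eq_getElem_cons hk2
        have hg1 : PySem.List.pyGet? nums i = some nums[i.toNat] := by
          rw [PySem.List.pyGet?_of_nonneg nums hi]
          exact List.getElem?_eq_getElem hkl
        have hg2 : PySem.List.pyGet? nums (i + 1) = some nums[i.toNat + 1] := by
          rw [PySem.List.pyGet?_of_nonneg nums (by omega)]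
          have : (i + 1).toNat = i.toNat + 1 := by omega
          rw [this]
          exact List.getElem?_eq_getElem hk2
        by_cases heq : nums[i.toNat] = nums[i.toNat + 1]
        · have heqg : PySem.List.pyGet? nums i = PySem.List.pyGet? nums (i + 1) := by
            rw [hg1, hg2, heq]
          rw [pvLoopA]
          have hodd : ¬ index % 2 ≠ 0 := by omega
          simp only [if_pos h1, if_neg hodd, if_neg hlast, if_pos heqg]
          have hit : (i + 1).toNat = i.toNat + 1 := by omega
          rw [ih (i + 1) index (steps + 1) (by omega) he (by omega), hit, hd1, hd2]
          simp only [gRec]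
          rw [if_pos heq]
          ring
        · have hng : ¬ PySem.List.pyGet? nums i = PySem.List.pyGet? nums (i + 1) := by
            rw [hg1, hg2]
            exact fun hc => heq (Option.some.inj hc)
          rw [pvLoopA]
          have hodd : ¬ index % 2 ≠ 0 := by omega
          simp only [if_pos h1, if_neg hodd, if_neg hlast, if_neg hng]
          rw [pvLoopA]
          have h3 : i + 1 < (nums.length : Int) := by omega
          have hodd2 : (index + 1) % 2 ≠ 0 := by omega
          simp only [if_pos h3, if_pos hodd2]
          have hstep : i + 1 + 1 = i + 2 := by ring
          rw [hstep]
          have hit : (i + 2).toNat = i.toNat + 2 := by omega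
          rw [ih (i + 2) (index + 1 + 1) steps (by omega) (by omega) (by omega), hit]
          rw [hd1, hd2]
          simp only [gRec]
          rw [if_neg heq]
    · rw [pvLoopA]
      have hd : nums.drop i.toNat = [] := List.drop_eq_nil_of_le (by omega)
      rw [if_neg h1]
      simp [he, hd, gRec]

-- ===== VERDICT (by name: the statement is the Claim_ definition above) =====
theorem solution_1526_3_spec : Claim_equal_solution_1526_3 := by
  intro nums _
  unfold Spec_solution_1526_3 solution_1526_3 solution_1526_3_alt
  rw [runs_eq_rle, walk_rle_g nums 0]
  have := loopA_g nums ((nums.length : Int) - 0).toNat 0 0 0 le_rfl rfl le_rfl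
  simpa using this
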